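-- pv_equiv track=rewrite | github.com/lambda-pixel/ed-shot-mapper | ed-shot-mapper.py | guess_location_from_timestamp
-- ===== SOURCE A (Python) =====
-- def get_system_from_entry(entries):
--     for entry in entries:
--         if 'StarSystem' in entry:
--             return entry['StarSystem']
--
--     return None
--
-- def guess_location_from_timestamp(timestamp, journal_data):
--     keys = sorted(journal_data.keys())
--
--     last_key = -1
--     curr_key_idx = -1
--
--     for i, key in enumerate(keys):
--         if key <= timestamp and key > last_key:
--             last_key = key
--             curr_key_idx = i
--
--     system_found = None
--
--     while curr_key_idx >= 0:
--         curr_key = keys[curr_key_idx]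
--         guessed_system = get_system_from_entry(journal_data[curr_key])
--
--         if guessed_system is not None:
--             system_found = guessed_system
--             break
--
--         curr_key_idx -= 1
--
--     return system_found
-- ===== SOURCE B (Python) =====
-- def guess_location_from_timestamp(timestamp, journal_data):
--     best_key = None
--     best_system = None
--     for key, entries in journal_data.items():
--         if key > timestamp or (best_key is not None and key <= best_key):
--             continue
--         for entry in entries:
--             if 'StarSystem' in entry:
--                 best_key = key
--                 best_system = entry['StarSystem']
--                 break
--     return best_system
-- ===== Notes on version B (the rewrite author's own statement) =====
-- stated objective: alternative
-- what changed: B removes A's sort entirely: a single pass over the dict items keeps the best (largest key <= timestamp whose entries contain 'StarSystem') in an accumulator, instead of A's sort-all-keys + max-finding loop + backward index walk.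
-- intended difference: When every journal key <= timestamp is negative and one of those keys' entries contains 'StarSystem', A returns None because its last_key = -1 sentinel silently discards negative keys, while B returns that system name, which is the intended latest system at or before the timestamp. — e.g. on guess_location_from_timestamp(-1, [(-2, [[("StarSystem", "Sol")]])]): A returns none, B returns some "Sol"
import Mathlib
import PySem

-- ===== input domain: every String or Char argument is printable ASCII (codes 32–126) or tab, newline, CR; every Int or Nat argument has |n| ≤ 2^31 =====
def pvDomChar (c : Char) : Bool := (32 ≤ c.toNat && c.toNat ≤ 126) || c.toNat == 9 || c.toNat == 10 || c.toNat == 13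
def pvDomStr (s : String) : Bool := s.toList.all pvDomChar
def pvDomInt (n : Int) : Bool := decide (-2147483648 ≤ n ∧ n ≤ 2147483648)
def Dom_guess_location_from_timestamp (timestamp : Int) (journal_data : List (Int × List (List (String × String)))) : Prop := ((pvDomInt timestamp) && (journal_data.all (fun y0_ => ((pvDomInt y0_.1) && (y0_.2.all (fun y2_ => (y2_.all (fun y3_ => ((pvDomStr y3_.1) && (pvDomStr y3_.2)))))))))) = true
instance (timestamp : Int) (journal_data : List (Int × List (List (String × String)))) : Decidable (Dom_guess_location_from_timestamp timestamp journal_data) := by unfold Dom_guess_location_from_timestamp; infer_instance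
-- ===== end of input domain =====

-- B drops A's sort + max-finding loop + backward index walk for a single unsorted pass keeping the best (key, system) in an accumulator (objective: alternative).

-- ===== PORT A =====
def pvGetSystemFromEntry : List (List (String × String)) → Option String
  | [] => none
  | entry :: rest =>
    -- 'StarSystem' in entry / entry['StarSystem'] on the Python dict entry
    if (PySem.Dict.ofList entry).contains "StarSystem" then
      (PySem.Dict.ofList entry).get? "StarSystem"
    else pvGetSystemFromEntry rest

-- the 'while curr_key_idx >= 0' loop; keys[curr_key_idx] and journal_data[curr_key] are always
-- in range / present when reached (idx starts at a valid index of keys and only decreases)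
def pvWhileScan (d : PySem.Dict Int (List (List (String × String)))) (keys : List Int) (idx : Int) : Option String :=
  if h : 0 ≤ idx then
    match pvGetSystemFromEntry (d.getD (PySem.List.pyGetD keys idx 0) []) with
    | some s => some s
    | none => pvWhileScan d keys (idx - 1)
  else none
termination_by (idx + 1).toNat
decreasing_by omega

def guess_location_from_timestamp (timestamp : Int) (journal_data : List (Int × List (List (String × String)))) : Option String :=
  let d := PySem.Dict.ofList journal_data
  let keys := PySem.List.sorted d.keys (fun x => x) false
  let st := (PySem.List.enumerate keys 0).foldl
      (fun (st : Int × Int) (ik : Int × Int) =>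
        if ik.2 ≤ timestamp ∧ st.1 < ik.2 then (ik.2, ik.1) else st) (-1, -1)
  pvWhileScan d keys st.2

-- ===== PORT B =====
-- the body of B's 'for key, entries in journal_data.items()' loop, acting on the (best_key, best_system) pair
def pvStep (timestamp : Int) (st : Option Int × Option String) (p : Int × List (List (String × String))) : Option Int × Option String :=
  if (decide (timestamp < p.1) || (match st.1 with | some b => decide (p.1 ≤ b) | none => false)) = true then
    st  -- 'continue'
  else
    -- inner 'for entry in entries: if StarSystem in entry: …; break'
    match p.2.findSome? (fun e => (PySem.Dict.ofList e).get? "StarSystem") with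
    | some s => (some p.1, some s)
    | none => st

def guess_location_from_timestamp_alt (timestamp : Int) (journal_data : List (Int × List (List (String × String)))) : Option String :=
  let d := PySem.Dict.ofList journal_data
  (d.items.foldl (pvStep timestamp) (none, none)).2

-- ===== PRECONDITION & SPEC =====
-- When every journal key ≤ timestamp is negative and some such key's entries carry a 'StarSystem',
-- A returns None (its '-1' sentinel silently discards negative keys) while B returns that system name,
-- which is the intended "latest system at or before the timestamp".
def D_guess_location_from_timestamp (timestamp : Int) (journal_data : List (Int × List (List (String × String)))) : Prop :=
  (∀ k ∈ (PySem.Dict.ofList journal_data).keys, k ≤ timestamp → k < 0) ∧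
  (∃ p ∈ (PySem.Dict.ofList journal_data).items, p.1 ≤ timestamp ∧
      ∃ e ∈ p.2, (PySem.Dict.ofList e).contains "StarSystem" = true)
instance (timestamp : Int) (journal_data : List (Int × List (List (String × String)))) : Decidable (D_guess_location_from_timestamp timestamp journal_data) := by unfold D_guess_location_from_timestamp; infer_instance

def Spec_guess_location_from_timestamp (timestamp : Int) (journal_data : List (Int × List (List (String × String)))) (out : Option String) : Prop := ¬ D_guess_location_from_timestamp timestamp journal_data → out = guess_location_from_timestamp_alt timestamp journal_data
instance (timestamp : Int) (journal_data : List (Int × List (List (String × String)))) (out : Option String) : Decidable (Spec_guess_location_from_timestamp timestamp journal_data out) := by unfold Spec_guess_location_from_timestamp; infer_instance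

def pvDiffWitness_guess_location_from_timestamp : Int × (List (Int × List (List (String × String)))) :=
  (-1, [(-2, [[("StarSystem", "Sol")]])])
def pvDiffWitnessOut_guess_location_from_timestamp : (Option String) × (Option String) := (none, some "Sol")

-- ===== CLAIM (what is proved, stated in full; the proofs are below) =====
def Claim_unchanged_guess_location_from_timestamp : Prop := ∀ (timestamp : Int) (journal_data : List (Int × List (List (String × String)))), Dom_guess_location_from_timestamp timestamp journal_data → Spec_guess_location_from_timestamp timestamp journal_data (guess_location_from_timestamp timestamp journal_data)
def Claim_changed_guess_location_from_timestamp : Prop := Dom_guess_location_from_timestamp (pvDiffWitness_guess_location_from_timestamp.1) (pvDiffWitness_guess_location_from_timestamp.2) ∧ D_guess_location_from_timestamp (pvDiffWitness_guess_location_from_timestamp.1) (pvDiffWitness_guess_location_from_timestamp.2) ∧ guess_location_from_timestamp (pvDiffWitness_guess_location_from_timestamp.1) (pvDiffWitness_guess_location_from_timestamp.2) = pvDiffWitnessOut_guess_location_from_timestamp.1 ∧ guess_location_from_timestamp_alt (pvDiffWitness_guess_location_from_timestamp.1) (pvDiffWitness_guess_location_from_timestamp.2) = pvDiffWitnessOut_guess_location_from_timestamp.2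 ∧ pvDiffWitnessOut_guess_location_from_timestamp.1 ≠ pvDiffWitnessOut_guess_location_from_timestamp.2
def Claim_exact_guess_location_from_timestamp : Prop := ∀ (timestamp : Int) (journal_data : List (Int × List (List (String × String)))), Dom_guess_location_from_timestamp timestamp journal_data → D_guess_location_from_timestamp timestamp journal_data → guess_location_from_timestamp timestamp journal_data ≠ guess_location_from_timestamp_alt timestamp journal_data

-- ===== LEMMAS AND PROOFS =====

theorem pv_getSystem_eq_findSome (entries : List (List (String × String))) :
    pvGetSystemFromEntry entries
      = entries.findSome? (fun e => (PySem.Dict.ofList e).get? "StarSystem") := by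
  induction entries with
  | nil => rfl
  | cons e rest ih =>
    rw [pvGetSystemFromEntry, List.findSome?_cons]
    rw [PySem.Dict.contains_eq_isSome_get?]
    cases hg : (PySem.Dict.ofList e).get? "StarSystem" <;> simp [hg, ih]

theorem pv_while_eq_take (d : PySem.Dict Int (List (List (String × String)))) (keys : List Int)
    (n : Nat) (hn : n ≤ keys.length) :
    pvWhileScan d keys ((n : Int) - 1)
      = ((keys.take n).reverse).findSome? (fun k => pvGetSystemFromEntry (d.getD k [])) := by
  induction n with
  | zero => rw [pvWhileScan.eq_def]; norm_num
  | succ m ih =>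
    rw [pvWhileScan.eq_def]
    have h0 : (0:Int) ≤ (↑(m+1) : Int) - 1 := by omega
    rw [dif_pos h0]
    have hm : m < keys.length := by omega
    have hidx : ((m+1 : Nat) : Int) - 1 = ((m : Nat) : Int) := by push_cast; ring
    have hget : PySem.List.pyGetD keys (((m+1 : Nat) : Int) - 1) 0 = keys[m] := by
      rw [hidx, PySem.List.pyGetD_natCast, List.getD_eq_getElem _ _ hm]
    have htake : keys.take (m+1) = keys.take m ++ [keys[m]] := by
      rw [List.take_succ, List.getElem?_eq_getElem hm]; rfl
    rw [hget, htake, List.reverse_append, List.reverse_singleton, List.singleton_append,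
        List.findSome?_cons]
    cases hf : pvGetSystemFromEntry (d.getD keys[m] []) with
    | some s => simp [hf]
    | none =>
      simp only [hf]
      rw [hidx]
      exact ih (by omega)

theorem pv_takeWhile_eq_filter (ts : Int) (S : List Int) (h : S.Pairwise (· < ·)) :
    S.takeWhile (fun k => decide (k ≤ ts)) = S.filter (fun k => decide (k ≤ ts)) := by
  induction S with
  | nil => rfl
  | cons x T ih =>
    rw [List.pairwise_cons] at h
    by_cases hx : x ≤ ts
    · rw [List.takeWhile_cons_of_pos (by simpa using hx), List.filter_cons_of_pos (by simpa using hx),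
          ih h.2]
    · rw [List.takeWhile_cons_of_neg (by simpa using hx), List.filter_cons_of_neg (by simpa using hx)]
      rw [List.filter_eq_nil_iff.mpr]
      intro y hy
      have := h.1 y hy
      simp; omega

theorem pv_last_is_max (l : List Int) (h : l.Pairwise (· < ·)) (m : Int)
    (hm : l.getLast? = some m) : ∀ x ∈ l, x ≤ m := by
  intro x hx
  have hml : m ∈ l := List.mem_of_getLast? hm
  rcases List.getLast?_eq_some_iff.mp hm with ⟨l', rfl⟩
  rcases List.mem_append.mp hx with hx' | hx'
  · have := (List.pairwise_append.mp h).2.2 x hx' m (List.mem_singleton_self m)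
    omega
  · simp at hx'; omega

theorem pv_gl {α : Type} (x : α) (l : List α) : (x :: l).getLast? = some (l.getLast?.getD x) := by
  induction l generalizing x with
  | nil => rfl
  | cons b t ih => rw [List.getLast?_cons_cons, ih b]; rfl

theorem pv_fold_spec (ts : Int) : ∀ (S : List Int), S.Pairwise (· < ·) → ∀ (s a i : Int),
    (PySem.List.enumerate S s).foldl
        (fun (st : Int × Int) (ik : Int × Int) =>
          if ik.2 ≤ ts ∧ st.1 < ik.2 then (ik.2, ik.1) else st) (a, i)
      = match (S.takeWhile (fun k => decide (k ≤ ts))).getLast? with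
        | some m => if a < m then (m, s + ((S.takeWhile (fun k => decide (k ≤ ts))).length : Int) - 1) else (a, i)
        | none => (a, i) := by
  intro S
  induction S with
  | nil => intro _ s a i; rfl
  | cons x T ih =>
    intro h s a i
    rw [List.pairwise_cons] at h
    rw [PySem.List.enumerate_cons, List.foldl_cons]
    by_cases hx : x ≤ ts
    · rw [List.takeWhile_cons_of_pos (by simpa using hx), pv_gl]
      have hTlast : ∀ m, (T.takeWhile (fun k => decide (k ≤ ts))).getLast? = some m → x < m := by
        intro m hm
        exact h.1 m ((List.takeWhile_prefix _).subset (List.mem_of_getLast? hm))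
      by_cases hax : a < x
      · simp only [if_pos (show x ≤ ts ∧ a < x from ⟨hx, hax⟩)]
        rw [ih h.2 (s+1) x s]
        cases hL : (T.takeWhile (fun k => decide (k ≤ ts))).getLast? with
        | none =>
          simp only [hL, Option.getD_none]
          rw [if_pos hax]
          have : T.takeWhile (fun k => decide (k ≤ ts)) = [] := by
            cases hE : T.takeWhile (fun k => decide (k ≤ ts)) with
            | nil => rfl
            | cons p ps => rw [hE] at hL; rw [pv_gl] at hL; simp at hL
          rw [this]
          simp
        | some m =>
          have hxm := hTlast m hL
          simp only [hL, Option.getD_some]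
          rw [if_pos hxm, if_pos (by omega : a < m)]
          simp only [List.length_cons]
          congr 1
          push_cast
          ring
      · simp only [if_neg (show ¬ (x ≤ ts ∧ a < x) by tauto)]
        rw [ih h.2 (s+1) a i]
        cases hL : (T.takeWhile (fun k => decide (k ≤ ts))).getLast? with
        | none =>
          simp only [hL, Option.getD_none]
          rw [if_neg hax]
        | some m =>
          have hxm := hTlast m hL
          simp only [hL, Option.getD_some]
          by_cases ham : a < m
          · rw [if_pos ham, if_pos ham]
            simp only [List.length_cons]
            congr 1
            push_cast
            ring
          · rw [if_neg ham, if_neg ham]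
    · rw [List.takeWhile_cons_of_neg (by simpa using hx)]
      simp only [if_neg (show ¬ (x ≤ ts ∧ a < x) by tauto)]
      rw [ih h.2 (s+1) a i]
      have : T.takeWhile (fun k => decide (k ≤ ts)) = [] := by
        cases T with
        | nil => rfl
        | cons y t =>
          have hy := h.1 y (by simp)
          rw [List.takeWhile_cons_of_neg]
          simp; omega
      rw [this]
      rfl

theorem pv_S_pairwise (jd : List (Int × List (List (String × String)))) :
    (PySem.List.sorted (PySem.Dict.ofList jd).keys (fun x => x) false).Pairwise (· < ·) := by
  have hperm := PySem.List.sorted_perm (PySem.Dict.ofList jd).keys (fun x => x) false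
  have hnd : (PySem.List.sorted (PySem.Dict.ofList jd).keys (fun x => x) false).Nodup :=
    hperm.nodup_iff.mpr (PySem.Dict.nodup_keys_ofList jd)
  have hle := PySem.List.sorted_pairwise (PySem.Dict.ofList jd).keys (fun x => x)
  exact (hle.and hnd).imp (fun h => lt_of_le_of_ne h.1 h.2)

theorem pv_candidates_eq (ts : Int) (jd : List (Int × List (List (String × String)))) :
    PySem.List.sorted ((PySem.Dict.ofList jd).keys.filter (fun k => decide (k ≤ ts))) (fun x => x) true
      = ((PySem.List.sorted (PySem.Dict.ofList jd).keys (fun x => x) false).takeWhile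
          (fun k => decide (k ≤ ts))).reverse := by
  have hS := pv_S_pairwise jd
  have hperm := PySem.List.sorted_perm (PySem.Dict.ofList jd).keys (fun x => x) false
  apply PySem.List.sorted_rev_eq_of_perm_of_pairwise_gt
  · rw [pv_takeWhile_eq_filter ts _ hS]
    exact (List.reverse_perm _).trans (hperm.filter _)
  · rw [List.pairwise_reverse]
    exact (List.Pairwise.sublist (List.takeWhile_sublist _) hS).imp (fun h => h)

-- B-side: the fold's step commutes on items with distinct keys
theorem pv_step_comm (ts : Int) (p q : Int × List (List (String × String)))
    (hpq : p.1 ≠ q.1) (z : Option Int × Option String) :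
    pvStep ts (pvStep ts z p) q = pvStep ts (pvStep ts z q) p := by
  obtain ⟨zb, zs⟩ := z
  cases hgp : p.2.findSome? (fun e => (PySem.Dict.ofList e).get? "StarSystem") with
  | none =>
    have hp : ∀ st, pvStep ts st p = st := by
      intro st; simp [pvStep, hgp]
    rw [hp, hp]
  | some sp =>
    cases hgq : q.2.findSome? (fun e => (PySem.Dict.ofList e).get? "StarSystem") with
    | none =>
      have hq : ∀ st, pvStep ts st q = st := by
        intro st; simp [pvStep, hgq]
      rw [hq, hq]
    | some sq =>
      by_cases h1 : ts < p.1
      · have hp : ∀ st, pvStep ts st p = st := by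
          intro st; simp [pvStep, h1]
        rw [hp, hp]
      · by_cases h2 : ts < q.1
        · have hq : ∀ st, pvStep ts st q = st := by
            intro st; simp [pvStep, h2]
          rw [hq, hq]
        · have hkey : p.1 < q.1 ∨ q.1 < p.1 := by omega
          cases zb with
          | none =>
            rcases hkey with hlt | hlt
            · simp [pvStep, hgp, hgq, h1, h2, hlt, le_of_lt hlt,
                    show ¬ q.1 ≤ p.1 by omega]
            · simp [pvStep, hgp, hgq, h1, h2, hlt, le_of_lt hlt,
                    show ¬ p.1 ≤ q.1 by omega]
          | some b =>
            by_cases hb1 : p.1 ≤ b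
            · by_cases hb2 : q.1 ≤ b
              · simp [pvStep, hgp, hgq, h1, h2, hb1, hb2]
              · simp [pvStep, hgp, hgq, h1, h2, hb1, hb2,
                      show p.1 ≤ q.1 by omega]
            · by_cases hb2 : q.1 ≤ b
              · simp [pvStep, hgp, hgq, h1, h2, hb1, hb2,
                      show q.1 ≤ p.1 by omega]
              · rcases hkey with hlt | hlt
                · simp [pvStep, hgp, hgq, h1, h2, hb1, hb2, le_of_lt hlt,
                        show ¬ q.1 ≤ p.1 by omega]
                · simp [pvStep, hgp, hgq, h1, h2, hb1, hb2, le_of_lt hlt,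
                        show ¬ p.1 ≤ q.1 by omega]

-- once the accumulator holds a key at least as large as everything eligible left, the fold is inert
theorem pv_fold_inert (ts : Int) (b : Int) (s : Option String) :
    ∀ (L : List (Int × List (List (String × String)))),
      (∀ p ∈ L, p.1 ≤ b ∨ ts < p.1) →
      L.foldl (pvStep ts) (some b, s) = (some b, s) := by
  intro L
  induction L with
  | nil => intro _; rfl
  | cons p T ih =>
    intro h
    rw [List.foldl_cons]
    have hskip : pvStep ts (some b, s) p = (some b, s) := by
      simp only [pvStep]
      rw [if_pos]
      rcases h p (by simp) with h' | h' <;> simp [h']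
    rw [hskip]
    exact ih (fun q hq => h q (by simp [hq]))

theorem pv_findSome?_congr {α β : Type} (l : List α) (f g : α → Option β)
    (h : ∀ x ∈ l, f x = g x) : l.findSome? f = l.findSome? g := by
  induction l with
  | nil => rfl
  | cons a t ih =>
    rw [List.findSome?_cons, List.findSome?_cons, h a (by simp),
        ih (fun x hx => h x (by simp [hx]))]

theorem pv_findSome?_if_filter {α β : Type} (l : List α) (c : α → Bool) (f : α → Option β) :
    l.findSome? (fun x => if c x then f x else none) = (l.filter c).findSome? f := by
  induction l with
  | nil => rfl
  | cons a t ih =>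
    by_cases h : c a
    · simp [List.findSome?_cons, List.filter_cons, h, ih]
    · simp [List.filter_cons, h, ih]

-- on a strictly key-descending list the fold returns the first eligible hit
theorem pv_fold_desc (ts : Int) :
    ∀ (L : List (Int × List (List (String × String)))),
      L.Pairwise (fun p q => q.1 < p.1) →
      (L.foldl (pvStep ts) (none, none)).2
        = L.findSome? (fun p => if decide (p.1 ≤ ts) then
            p.2.findSome? (fun e => (PySem.Dict.ofList e).get? "StarSystem") else none) := by
  intro L
  induction L with
  | nil => intro _; rfl
  | cons p T ih =>
    intro h
    rw [List.pairwise_cons] at h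
    rw [List.foldl_cons, List.findSome?_cons]
    by_cases hts : p.1 ≤ ts
    · have hstep : pvStep ts (none, none) p
          = match p.2.findSome? (fun e => (PySem.Dict.ofList e).get? "StarSystem") with
            | some s => (some p.1, some s)
            | none => (none, none) := by
        simp only [pvStep]
        rw [if_neg (by simp; omega)]
      cases hg : p.2.findSome? (fun e => (PySem.Dict.ofList e).get? "StarSystem") with
      | some s =>
        rw [hstep, hg]
        rw [pv_fold_inert ts p.1 (some s) T (fun q hq => Or.inl (le_of_lt (h.1 q hq)))]
        simp [hts, hg]
      | none =>
        rw [hstep, hg]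
        simp only [hg, ite_self]
        exact ih h.2
    · have hstep : pvStep ts (none, none) p = (none, none) := by
        simp [pvStep, show ts < p.1 from by omega]
      rw [hstep]
      rw [if_neg (show ¬ (decide (p.1 ≤ ts) = true) by simp; omega)]
      exact ih h.2

-- B's single pass computes the descending-candidate scan that also characterises A
theorem pv_B_eq (ts : Int) (jd : List (Int × List (List (String × String)))) :
    guess_location_from_timestamp_alt ts jd
      = (((PySem.List.sorted (PySem.Dict.ofList jd).keys (fun x => x) false).takeWhile
          (fun k => decide (k ≤ ts))).reverse).findSome?
          (fun k => pvGetSystemFromEntry ((PySem.Dict.ofList jd).getD k [])) := by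
  have hkeys : (PySem.Dict.ofList jd).keys = (PySem.Dict.ofList jd).items.map Prod.fst := rfl
  have hknd : ((PySem.Dict.ofList jd).items.map Prod.fst).Nodup := by
    rw [← hkeys]; exact PySem.Dict.nodup_keys_ofList jd
  -- reorder the fold to the key-descending permutation of the items
  have hDIperm : (PySem.List.sorted (PySem.Dict.ofList jd).items (fun p => p.1) true).Perm
      (PySem.Dict.ofList jd).items := PySem.List.sorted_perm _ _ _
  have hcomm : ∀ x ∈ (PySem.Dict.ofList jd).items, ∀ y ∈ (PySem.Dict.ofList jd).items,
      ∀ z, pvStep ts (pvStep ts z x) y = pvStep ts (pvStep ts z y) x := by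
    intro x hx y hy z
    by_cases hxy : x = y
    · subst hxy; rfl
    · exact pv_step_comm ts x y
        (fun hk => hxy (List.inj_on_of_nodup_map hknd hx hy hk)) z
  have hfold : (PySem.Dict.ofList jd).items.foldl (pvStep ts) (none, none)
      = (PySem.List.sorted (PySem.Dict.ofList jd).items (fun p => p.1) true).foldl
          (pvStep ts) (none, none) := hDIperm.symm.foldl_eq' (fun x hx y hy => hcomm x hx y hy) _
  -- the descending list is strictly descending in keys
  have hdesc : (PySem.List.sorted (PySem.Dict.ofList jd).items (fun p => p.1) true).Pairwise
      (fun p q => q.1 < p.1) := by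
    have hle := PySem.List.sorted_pairwise_rev (PySem.Dict.ofList jd).items (fun p => p.1)
    have hne : (PySem.List.sorted (PySem.Dict.ofList jd).items (fun p => p.1) true).Pairwise
        (fun p q => p.1 ≠ q.1) := by
      have : ((PySem.List.sorted (PySem.Dict.ofList jd).items (fun p => p.1) true).map
          Prod.fst).Nodup := (hDIperm.map Prod.fst).nodup_iff.mpr hknd
      exact List.pairwise_map.mp this
    exact (hle.and hne).imp (fun h => lt_of_le_of_ne h.1 (Ne.symm h.2))
  show ((PySem.Dict.ofList jd).items.foldl (pvStep ts) (none, none)).2 = _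
  rw [hfold, pv_fold_desc ts _ hdesc, pv_findSome?_if_filter]
  -- pass from filtered items to their keys
  have hmapf : ((PySem.List.sorted (PySem.Dict.ofList jd).items (fun p => p.1) true).filter
        (fun p => decide (p.1 ≤ ts))).map Prod.fst
      = PySem.List.sorted ((PySem.Dict.ofList jd).keys.filter (fun k => decide (k ≤ ts)))
          (fun x => x) true := by
    symm
    apply PySem.List.sorted_rev_eq_of_perm_of_pairwise_gt
    · have h1 : ((PySem.List.sorted (PySem.Dict.ofList jd).items (fun p => p.1) true).filter
          (fun p => decide (p.1 ≤ ts))).Perm ((PySem.Dict.ofList jd).items.filter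
          (fun p => decide (p.1 ≤ ts))) := hDIperm.filter _
      have h2 := h1.map Prod.fst
      rw [hkeys, List.filter_map]
      exact h2
    · have := (List.Pairwise.sublist (List.filter_sublist (p := fun p => decide (p.1 ≤ ts))) hdesc)
      exact List.pairwise_map.mpr (this.imp (fun h => h))
  rw [pv_candidates_eq] at hmapf
  rw [← hmapf, List.findSome?_map]
  apply pv_findSome?_congr
  intro p hp
  have hpI : p ∈ (PySem.Dict.ofList jd).items :=
    hDIperm.subset ((List.filter_sublist (p := fun p => decide (p.1 ≤ ts))).subset hp)
  have : (PySem.Dict.ofList jd).getD p.1 [] = p.2 := by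
    obtain ⟨k, v⟩ := p
    exact PySem.Dict.getD_of_mem_items _ hpI (PySem.Dict.nodup_keys_ofList jd) []
  simp only [Function.comp, pv_getSystem_eq_findSome, this]

theorem pv_A_none (ts : Int) (jd : List (Int × List (List (String × String))))
    (h : ∀ k ∈ (PySem.Dict.ofList jd).keys, k ≤ ts → k < 0) :
    guess_location_from_timestamp ts jd = none := by
  have hS := pv_S_pairwise jd
  have hperm := PySem.List.sorted_perm (PySem.Dict.ofList jd).keys (fun x => x) false
  simp only [guess_location_from_timestamp]
  rw [pv_fold_spec ts _ hS 0 (-1) (-1)]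
  have hPneg : ∀ k ∈ (PySem.List.sorted (PySem.Dict.ofList jd).keys (fun x => x) false).takeWhile
      (fun k => decide (k ≤ ts)), k < 0 := by
    intro k hk
    have hk2 : k ≤ ts := by simpa using List.mem_takeWhile_imp hk
    exact h k (hperm.subset ((List.takeWhile_prefix _).subset hk)) hk2
  cases hL : ((PySem.List.sorted (PySem.Dict.ofList jd).keys (fun x => x) false).takeWhile
      (fun k => decide (k ≤ ts))).getLast? with
  | none =>
    simp only [hL]
    rw [pvWhileScan.eq_def]; norm_num
  | some m =>
    have hm : m < 0 := hPneg m (List.mem_of_getLast? hL)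
    simp only [hL]
    rw [if_neg (by omega : ¬ (-1:Int) < m)]
    rw [pvWhileScan.eq_def]; norm_num

theorem pv_A_eq_scan (ts : Int) (jd : List (Int × List (List (String × String)))) (m : Int)
    (hL : ((PySem.List.sorted (PySem.Dict.ofList jd).keys (fun x => x) false).takeWhile
        (fun k => decide (k ≤ ts))).getLast? = some m) (h0 : 0 ≤ m) :
    guess_location_from_timestamp ts jd
      = (((PySem.List.sorted (PySem.Dict.ofList jd).keys (fun x => x) false).takeWhile
          (fun k => decide (k ≤ ts))).reverse).findSome?
          (fun k => pvGetSystemFromEntry ((PySem.Dict.ofList jd).getD k [])) := by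
  have hS := pv_S_pairwise jd
  simp only [guess_location_from_timestamp]
  rw [pv_fold_spec ts _ hS 0 (-1) (-1)]
  simp only [hL]
  rw [if_pos (by omega : (-1:Int) < m)]
  have hlen : ((PySem.List.sorted (PySem.Dict.ofList jd).keys (fun x => x) false).takeWhile
      (fun k => decide (k ≤ ts))).length
      ≤ (PySem.List.sorted (PySem.Dict.ofList jd).keys (fun x => x) false).length :=
    (List.takeWhile_prefix _).length_le
  have harith : (0 : Int) + (((PySem.List.sorted (PySem.Dict.ofList jd).keys (fun x => x) false).takeWhile
      (fun k => decide (k ≤ ts))).length : Int) - 1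
      = (((PySem.List.sorted (PySem.Dict.ofList jd).keys (fun x => x) false).takeWhile
      (fun k => decide (k ≤ ts))).length : Int) - 1 := by ring
  rw [harith, pv_while_eq_take _ _ _ hlen]
  congr 2
  exact ((List.prefix_iff_eq_take.mp (List.takeWhile_prefix _))).symm

theorem pv_mem_P_of_eligible (ts k : Int) (jd : List (Int × List (List (String × String))))
    (hkK : k ∈ (PySem.Dict.ofList jd).keys) (hkts : k ≤ ts) :
    k ∈ (PySem.List.sorted (PySem.Dict.ofList jd).keys (fun x => x) false).takeWhile
        (fun k => decide (k ≤ ts)) := by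
  rw [pv_takeWhile_eq_filter ts _ (pv_S_pairwise jd), List.mem_filter]
  exact ⟨(PySem.List.sorted_perm _ _ _).mem_iff.mpr hkK, by simpa using hkts⟩

-- ===== VERDICT (by name: the statement is the Claim_ definition above) =====
theorem guess_location_from_timestamp_spec : Claim_unchanged_guess_location_from_timestamp := by
  intro ts jd _ hND
  show guess_location_from_timestamp ts jd = guess_location_from_timestamp_alt ts jd
  have hS := pv_S_pairwise jd
  by_cases hex : ∃ k ∈ (PySem.Dict.ofList jd).keys, k ≤ ts ∧ 0 ≤ k
  · obtain ⟨k, hkK, hkts, hk0⟩ := hex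
    have hkP := pv_mem_P_of_eligible ts k jd hkK hkts
    cases hL : ((PySem.List.sorted (PySem.Dict.ofList jd).keys (fun x => x) false).takeWhile
        (fun k => decide (k ≤ ts))).getLast? with
    | none =>
      rw [List.getLast?_eq_none_iff.mp hL] at hkP
      simp at hkP
    | some m =>
      have hPp : (((PySem.List.sorted (PySem.Dict.ofList jd).keys (fun x => x) false).takeWhile
          (fun k => decide (k ≤ ts)))).Pairwise (· < ·) :=
        List.Pairwise.sublist (List.takeWhile_sublist _) hS
      have hkm := pv_last_is_max _ hPp m hL k hkP
      rw [pv_A_eq_scan ts jd m hL (by omega), pv_B_eq]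
  · push_neg at hex
    have h1 : ∀ k ∈ (PySem.Dict.ofList jd).keys, k ≤ ts → k < 0 := by
      intro k hk hkts
      have := hex k hk hkts
      omega
    rw [pv_A_none ts jd h1, pv_B_eq]
    symm
    rw [List.findSome?_eq_none_iff]
    intro k hk
    have hkP := List.mem_reverse.mp hk
    have hkts : k ≤ ts := by simpa using List.mem_takeWhile_imp hkP
    have hkK : k ∈ (PySem.Dict.ofList jd).keys :=
      (PySem.List.sorted_perm _ _ _).subset ((List.takeWhile_prefix _).subset hkP)
    have hc2 : ¬ (∃ p ∈ (PySem.Dict.ofList jd).items, p.1 ≤ ts ∧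
        ∃ e ∈ p.2, (PySem.Dict.ofList e).contains "StarSystem" = true) := by
      intro h2
      exact hND ⟨h1, h2⟩
    simp only [PySem.Dict.keys] at hkK
    obtain ⟨⟨k', v⟩, hpv, hk'⟩ := List.mem_map.mp hkK
    cases hk'
    have hvd : (PySem.Dict.ofList jd).getD k' [] = v :=
      PySem.Dict.getD_of_mem_items _ hpv (PySem.Dict.nodup_keys_ofList jd) []
    rw [hvd, pv_getSystem_eq_findSome, List.findSome?_eq_none_iff]
    intro e he
    cases hg : (PySem.Dict.ofList e).get? "StarSystem" with
    | none => rfl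
    | some s =>
      exfalso
      apply hc2
      refine ⟨(k', v), hpv, hkts, e, he, ?_⟩
      rw [PySem.Dict.contains_eq_isSome_get?, hg]
      rfl

theorem guess_location_from_timestamp_changed : Claim_changed_guess_location_from_timestamp := by
  unfold Claim_changed_guess_location_from_timestamp
  refine ⟨by decide, by decide, ?_, by decide, by decide⟩
  show guess_location_from_timestamp (-1) [(-2, [[("StarSystem", "Sol")]])] = none
  simp only [guess_location_from_timestamp]
  rw [pvWhileScan.eq_def]
  norm_num
  intro h
  exact absurd h (by decide)

theorem guess_location_from_timestamp_tight : Claim_exact_guess_location_from_timestamp := by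
  intro ts jd _ hD
  have hDp := hD
  unfold D_guess_location_from_timestamp at hDp
  obtain ⟨h1, ⟨k, v⟩, hpv, hkts, e, he, hc⟩ := hDp
  have hkK : k ∈ (PySem.Dict.ofList jd).keys := PySem.Dict.mem_keys_of_mem_items _ hpv
  have hkP := pv_mem_P_of_eligible ts k jd hkK hkts
  rw [pv_A_none ts jd h1, pv_B_eq]
  intro heq
  have hnone := List.findSome?_eq_none_iff.mp heq.symm k (List.mem_reverse.mpr hkP)
  have hvd : (PySem.Dict.ofList jd).getD k [] = v :=
    PySem.Dict.getD_of_mem_items _ hpv (PySem.Dict.nodup_keys_ofList jd) []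
  rw [hvd, pv_getSystem_eq_findSome] at hnone
  have := List.findSome?_eq_none_iff.mp hnone e he
  rw [PySem.Dict.contains_eq_isSome_get?, this] at hc
  simp at hc
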